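-- pv_equiv track=rewrite | github.com/flavius0431/CS-UBB | YEAR1/SEM1/FP/LABORATOR_3/TemaLab3-ex(3,8).py | trei_elem_consecutive
-- ===== SOURCE A (Python) =====
-- def trei_elem_consecutive(number_list):
--     lista_maxima=[]
--     lista_sec=[]
--     nr1 = number_list[0]
--     nr2 = number_list[1]
--     lista_sec.append(nr1)
--     lista_sec.append(nr2)
--
--
--     for i in range(2, len(number_list)):
--         if nr1 == nr2 or nr1 == number_list[i] or nr2 == number_list[i]:
--             lista_sec.append(number_list[i])
--
--         else:
--             if len(lista_sec)>len(lista_maxima):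
--                 lista_maxima=lista_sec[:]
--             lista_sec.clear()
--
--         nr1 = nr2
--         nr2 = number_list[i]
--
--
--     if len(lista_sec)>len(lista_maxima):
--         lista_maxima=lista_sec[:]
--     return lista_maxima
-- ===== SOURCE B (Python) =====
-- def trei_elem_consecutive(number_list):
--     n = len(number_list)
--     # a position is "good" when it has fewer than two predecessors, or its
--     # triple of consecutive elements contains at least two equal values
--     good = [i < 2
--             or number_list[i - 2] == number_list[i - 1]
--             or number_list[i - 2] == number_list[i]
--             or number_list[i - 1] == number_list[i]
--             for i in range(n)]
--     best_len, best_start = 0, 0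
--     run_start = None
--     for i, g in enumerate(good + [False]):
--         if run_start is None:
--             if g:
--                 run_start = i
--         elif not g:
--             if i - run_start > best_len:
--                 best_len, best_start = i - run_start, run_start
--             run_start = None
--     return number_list[best_start:best_start + best_len]
-- ===== Notes on version B (the rewrite author's own statement) =====
-- stated objective: alternative
-- what changed: B replaces A's stateful accumulate-and-clear list building by a two-stage decomposition: precompute a boolean 'good' flag per position (trivially good for the first two, otherwise the triple condition), then a run-length scan that tracks only (start, length) of the longest run of good positions and returns a single slice; Pre_ excludes lists with fewer than two elements, on which A raises IndexError.
import Mathlib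
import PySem

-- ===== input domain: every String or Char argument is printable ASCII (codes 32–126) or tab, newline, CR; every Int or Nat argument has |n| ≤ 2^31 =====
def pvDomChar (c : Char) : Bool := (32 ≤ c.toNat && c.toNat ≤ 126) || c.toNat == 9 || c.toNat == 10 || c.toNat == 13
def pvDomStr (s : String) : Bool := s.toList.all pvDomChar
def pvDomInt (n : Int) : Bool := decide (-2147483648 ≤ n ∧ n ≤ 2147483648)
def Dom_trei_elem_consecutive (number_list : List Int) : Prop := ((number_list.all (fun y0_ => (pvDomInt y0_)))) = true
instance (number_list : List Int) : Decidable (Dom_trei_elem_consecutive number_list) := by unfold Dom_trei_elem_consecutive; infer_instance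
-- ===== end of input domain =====

-- B replaces A's accumulate-and-clear list building by a per-position boolean flag list
-- and a (start,length) run scan returning one slice; same linear cost (objective: alternative).
-- Equivalence is proved on lists of length ≥ 2 (A raises IndexError on shorter input).

-- ===== PORT A =====
-- the for-loop of A: state nr1, nr2, lista_sec, lista_maxima, remaining elements number_list[2:]
def treiLoopA : Int → Int → List Int → List Int → List Int → List Int × List Int
  | _, _, sec, mx, [] => (sec, mx)
  | nr1, nr2, sec, mx, x :: xs =>
    if nr1 == nr2 || nr1 == x || nr2 == x then
      treiLoopA nr2 x (sec ++ [x]) mx xs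
    else
      treiLoopA nr2 x [] (if mx.length < sec.length then sec else mx) xs

def trei_elem_consecutive (number_list : List Int) : List Int :=
  match number_list with
  | a :: b :: rest =>
    let r := treiLoopA a b [a, b] [] rest
    if r.2.length < r.1.length then r.1 else r.2
  | _ => []   -- Python raises IndexError here (number_list[0]/[1]); excluded by Pre_

-- ===== PORT B =====
-- good[i] of Source B: indices i-2, i-1, i are in range whenever 2 ≤ i < n, so getD is exact
def goodB (L : List Int) (i : Nat) : Bool :=
  decide (i < 2)
    || (L.getD (i - 2) 0 == L.getD (i - 1) 0)
    || (L.getD (i - 2) 0 == L.getD i 0)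
    || (L.getD (i - 1) 0 == L.getD i 0)

-- the for-loop of Source B: state (best_len, best_start) and run_start, over enumerate(good+[False])
def stepB (s : (Nat × Nat) × Option Nat) (p : Bool × Nat) : (Nat × Nat) × Option Nat :=
  match s.2, p.1 with
  | none, true => (s.1, some p.2)
  | some j, false => (if s.1.1 < p.2 - j then (p.2 - j, j) else s.1, none)
  | run, _ => (s.1, run)

def trei_elem_consecutive_alt (number_list : List Int) : List Int :=
  let n := number_list.length
  let good := (List.range n).map (goodB number_list)
  let st := ((good ++ [false]).zipIdx).foldl stepB ((0, 0), none)
  -- number_list[best_start : best_start + best_len] with nonnegative bounds: drop/take is exact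
  (number_list.drop st.1.2).take st.1.1

-- ===== PRECONDITION & SPEC =====
-- Pre_ excludes exactly the inputs on which A raises IndexError (fewer than two elements)
def Pre_trei_elem_consecutive (number_list : List Int) : Prop := 2 ≤ number_list.length
instance (number_list : List Int) : Decidable (Pre_trei_elem_consecutive number_list) := by
  unfold Pre_trei_elem_consecutive; infer_instance

def pvWitness_trei_elem_consecutive : List Int := [1, 1, 2, 5, 5, 5, 9]

def Spec_trei_elem_consecutive (number_list : List Int) (out : List Int) : Prop :=
  out = trei_elem_consecutive_alt number_list
instance (number_list : List Int) (out : List Int) : Decidable (Spec_trei_elem_consecutive number_list out) := by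
  unfold Spec_trei_elem_consecutive; infer_instance

-- ===== CLAIM (what is proved, stated in full; the proofs are below) =====
def Claim_equal_trei_elem_consecutive : Prop :=
  ∀ (number_list : List Int), Dom_trei_elem_consecutive number_list →
    Pre_trei_elem_consecutive number_list →
    Spec_trei_elem_consecutive number_list (trei_elem_consecutive number_list)

-- ===== LEMMAS AND PROOFS =====

-- the flag sequence as A's rolling pair (nr1, nr2) sees it
def flagsFrom : Int → Int → List Int → List Bool
  | _, _, [] => []
  | a, b, x :: xs => (a == b || a == x || b == x) :: flagsFrom b x xs

-- B's run scan, structurally over the flag list (the trailing [false] flush is the base case)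
def scanB : List Bool → Nat → Option Nat → (Nat × Nat) → Nat × Nat
  | [], _, none, best => best
  | [], i, some j, best => if best.1 < i - j then (i - j, j) else best
  | g :: gs, i, run, best =>
    match run, g with
    | none, true => scanB gs (i + 1) (some i) best
    | some j, false => scanB gs (i + 1) none (if best.1 < i - j then (i - j, j) else best)
    | run, _ => scanB gs (i + 1) run best

lemma flagsFrom_length (rest : List Int) : ∀ a b, (flagsFrom a b rest).length = rest.length := by
  induction rest with
  | nil => intro a b; simp [flagsFrom]
  | cons x xs ih => intro a b; simp [flagsFrom, ih]

lemma flagsFrom_getD (rest : List Int) : ∀ (a b : Int) (k : Nat), k < rest.length →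
    (flagsFrom a b rest).getD k false =
      (((a :: b :: rest).getD k 0 == (a :: b :: rest).getD (k + 1) 0)
        || ((a :: b :: rest).getD k 0 == (a :: b :: rest).getD (k + 2) 0)
        || ((a :: b :: rest).getD (k + 1) 0 == (a :: b :: rest).getD (k + 2) 0)) := by
  induction rest with
  | nil => intro a b k hk; simp at hk
  | cons x xs ih =>
    intro a b k hk
    cases k with
    | zero => simp [flagsFrom]
    | succ k =>
      have hk' : k < xs.length := by simpa using hk
      simpa [flagsFrom] using ih b x k hk'

-- Source B's good list equals [true, true] ++ flags
lemma good_eq (a b : Int) (rest : List Int) :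
    (List.range (a :: b :: rest).length).map (goodB (a :: b :: rest))
      = true :: true :: flagsFrom a b rest := by
  apply List.ext_getElem
  · simp [flagsFrom_length]
  · intro i h1 h2
    have hlen : (a :: b :: rest).length = rest.length + 2 := by simp
    have hi : i < rest.length + 2 := by
      have := h1; simp at this; omega
    rw [List.getElem_map, List.getElem_range]
    match i, hi with
    | 0, _ => simp [goodB]
    | 1, _ => simp [goodB]
    | (k + 2), hk =>
      have hk' : k < rest.length := by omega
      have := flagsFrom_getD rest a b k hk'
      have hget : (flagsFrom a b rest)[k]'(by simpa [flagsFrom_length] using hk') =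
          (flagsFrom a b rest).getD k false := by
        rw [List.getD_eq_getElem?_getD, List.getElem?_eq_getElem]; rfl
      simp only [List.getElem_cons_succ]
      rw [hget, this]
      simp [goodB]

-- the foldl of port B equals scanB
lemma fold_eq_scan (gs : List Bool) : ∀ (i : Nat) (run : Option Nat) (best : Nat × Nat),
    (((gs ++ [false]).zipIdx i).foldl stepB (best, run)).1 = scanB gs i run best := by
  induction gs with
  | nil =>
    intro i run best
    cases run <;> simp [scanB, stepB]
  | cons g gs ih =>
    intro i run best
    cases run with
    | none =>
      cases g <;> simp [List.zipIdx_cons, scanB, stepB, ih]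
    | some j =>
      cases g <;> simp [List.zipIdx_cons, scanB, stepB, ih]

lemma take_succ_of_drop {L : List Int} {m : Nat} {x : Int} {t : List Int}
    (h : L.drop m = x :: t) : L.take (m + 1) = L.take m ++ [x] := by
  have hm : m < L.length := by
    by_contra hc
    simp [List.drop_eq_nil_of_le (Nat.le_of_not_lt hc)] at h
  have hx : L[m]? = some x := by
    rw [List.getElem?_eq_getElem hm]
    have := congrArg List.head? h
    simpa [List.head?_drop, List.getElem?_eq_getElem hm] using this
  simp [List.take_add_one, hx]

-- the heart of the equivalence: A's loop state (sec, mx) tracked against B's ((len,start), run)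
lemma core (L : List Int) : ∀ (xs : List Int) (nr1 nr2 : Int) (m : Nat) (run : Option Nat)
    (sec mx : List Int) (best : Nat × Nat),
    L.drop m = nr1 :: nr2 :: xs →
    (match run with
     | some j => j ≤ m + 1 ∧ sec = (L.drop j).take (m + 2 - j)
     | none => sec = []) →
    mx = (L.drop best.2).take best.1 → mx.length = best.1 →
    (let r := treiLoopA nr1 nr2 sec mx xs;
     if r.2.length < r.1.length then r.1 else r.2)
      = (let b := scanB (flagsFrom nr1 nr2 xs) (m + 2) run best;
         (L.drop b.2).take b.1) := by
  intro xs
  induction xs with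
  | nil =>
    intro nr1 nr2 m run sec mx best hdrop hrun hmx hmxl
    have hlen : L.length = m + 2 := by
      have := congrArg List.length hdrop
      simp at this; omega
    cases run with
    | none =>
      simp only [hrun] at *
      simp [treiLoopA, flagsFrom, scanB, hmx]
    | some j =>
      obtain ⟨hj, hsec⟩ := hrun
      have hseclen : sec.length = m + 2 - j := by
        rw [hsec]; simp; omega
      simp only [treiLoopA, flagsFrom, scanB]
      by_cases h : mx.length < sec.length
      · rw [if_pos h, if_pos (by omega : best.1 < m + 2 - j), hsec]
      · rw [if_neg h, if_neg (by omega : ¬ best.1 < m + 2 - j), hmx]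
  | cons x xs ih =>
    intro nr1 nr2 m run sec mx best hdrop hrun hmx hmxl
    have hdrop1 : L.drop (m + 1) = nr2 :: x :: xs := by
      have := congrArg List.tail hdrop
      simpa [List.tail_drop] using this
    have hdrop2 : L.drop (m + 2) = x :: xs := by
      have := congrArg List.tail hdrop1
      have h21 : m + 2 = (m + 1) + 1 := rfl
      rw [h21]
      simpa [List.tail_drop] using this
    have hlen : m + 2 < L.length := by
      have := congrArg List.length hdrop
      simp at this; omega
    by_cases hf : (nr1 == nr2 || nr1 == x || nr2 == x) = true
    · -- flag true: A appends, B keeps/starts the run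
      cases run with
      | none =>
        simp only [hrun] at *
        simp only [treiLoopA, flagsFrom, scanB, hf, if_true]
        have hnew : ([] : List Int) ++ [x] = (L.drop (m + 2)).take (m + 1 + 2 - (m + 2)) := by
          rw [hdrop2]
          simp
        have := ih nr2 x (m + 1) (some (m + 2)) ([] ++ [x]) mx best hdrop1
          ⟨by omega, hnew⟩ hmx hmxl
        simpa using this
      | some j =>
        obtain ⟨hj, hsec⟩ := hrun
        simp only [treiLoopA, flagsFrom, scanB, hf, if_true]
        have hdd : (L.drop j).drop (m + 2 - j) = x :: xs := by
          rw [List.drop_drop]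
          have : j + (m + 2 - j) = m + 2 := by omega
          rw [this]; exact hdrop2
        have hext : sec ++ [x] = (L.drop j).take (m + 1 + 2 - j) := by
          rw [hsec]
          have h3 : m + 1 + 2 - j = (m + 2 - j) + 1 := by omega
          rw [h3]
          exact (take_succ_of_drop hdd).symm
        exact ih nr2 x (m + 1) (some j) (sec ++ [x]) mx best hdrop1
          ⟨by omega, hext⟩ hmx hmxl
    · -- flag false: A flushes sec into mx, B flushes the run into best
      cases run with
      | none =>
        simp only [hrun] at *
        simp only [treiLoopA, flagsFrom, scanB, hf, Bool.false_eq_true, if_false]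
        have h0 : ¬ mx.length < ([] : List Int).length := by simp
        rw [if_neg h0]
        exact ih nr2 x (m + 1) none [] mx best hdrop1 rfl hmx hmxl
      | some j =>
        obtain ⟨hj, hsec⟩ := hrun
        have hseclen : sec.length = m + 2 - j := by
          rw [hsec]; simp; omega
        simp only [treiLoopA, flagsFrom, scanB, hf, Bool.false_eq_true, if_false]
        by_cases h : mx.length < sec.length
        · rw [if_pos h, if_pos (by omega : best.1 < m + 2 - j)]
          exact ih nr2 x (m + 1) none [] sec (m + 2 - j, j) hdrop1 rfl hsec (by omega)
        · rw [if_neg h, if_neg (by omega : ¬ best.1 < m + 2 - j)]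
          exact ih nr2 x (m + 1) none [] mx best hdrop1 rfl hmx hmxl

-- ===== VERDICT (by name: the statement is the Claim_ definition above) =====
theorem trei_elem_consecutive_spec : Claim_equal_trei_elem_consecutive := by
  intro L _ hpre
  unfold Spec_trei_elem_consecutive
  match L, hpre with
  | a :: b :: rest, _ =>
    show (let r := treiLoopA a b [a, b] [] rest;
          if r.2.length < r.1.length then r.1 else r.2) = _
    simp only [trei_elem_consecutive_alt, good_eq a b rest]
    have hfold := fold_eq_scan (flagsFrom a b rest) 2 (some 0) (0, 0)
    simp only [List.cons_append, List.zipIdx_cons, List.foldl_cons] at hfold ⊢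
    simp only [stepB] at hfold ⊢
    rw [hfold]
    have := core (a :: b :: rest) rest a b 0 (some 0) [a, b] [] (0, 0) rfl
      ⟨by omega, by simp⟩ (by simp) (by simp)
    simpa using this
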